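-- pv_equiv track=rewrite | github.com/tiftran/adventofcode2018 | Day2.py | solve
-- ===== SOURCE A (Python) =====
-- def solve(input):
--     two = 0
--     three = 0
--     for word in input:
--         temp_2 = False
--         temp_3 = False
--         for letter in word:
--             val = word.count(letter)
--
--             if val == 2 and temp_2 is False:
--                 two += 1
--                 temp_2 = True
--
--             if val == 3 and temp_3 is False:
--                 three += 1
--                 temp_3 = True
--
--     return two * three
-- ===== SOURCE B (Python) =====
-- def solve(input):
--     two = 0
--     three = 0
--     for word in input:
--         counts = {}
--         for c in word:
--             counts[c] = counts.get(c, 0) + 1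
--         vals = counts.values()
--         if 2 in vals:
--             two += 1
--         if 3 in vals:
--             three += 1
--     return two * three
-- ===== Notes on version B (the rewrite author's own statement) =====
-- stated objective: alternative
-- what changed: Per word, a single pass builds a letter-frequency dictionary and membership of 2/3 in its values replaces A's per-letter word.count rescans and flag bookkeeping.
import Mathlib
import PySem

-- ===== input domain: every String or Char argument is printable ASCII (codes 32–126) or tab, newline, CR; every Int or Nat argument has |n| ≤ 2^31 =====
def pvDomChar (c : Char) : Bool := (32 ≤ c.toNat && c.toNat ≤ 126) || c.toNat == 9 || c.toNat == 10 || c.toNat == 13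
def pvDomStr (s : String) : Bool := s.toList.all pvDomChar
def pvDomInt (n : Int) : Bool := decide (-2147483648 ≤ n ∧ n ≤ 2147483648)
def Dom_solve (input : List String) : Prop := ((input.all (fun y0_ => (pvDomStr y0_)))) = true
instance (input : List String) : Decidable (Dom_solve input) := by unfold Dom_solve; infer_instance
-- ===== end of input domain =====

-- B replaces A's per-letter word.count rescans and flag bookkeeping with one frequency dictionary per word.

-- ===== PORT A =====
-- word.count(letter) for a 1-char needle equals the character count: ported exactly as List.count on toList.
def solve (input : List String) : Int :=
  let st := input.foldl (fun (st : Int × Int) word =>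
    let r := word.toList.foldl (fun (s : Int × Int × Bool × Bool) letter =>
      let two := s.1
      let three := s.2.1
      let t2 := s.2.2.1
      let t3 := s.2.2.2
      let val : Int := (word.toList.count letter : Int)
      let p2 : Int × Bool := if val = 2 ∧ t2 = false then (two + 1, true) else (two, t2)
      let p3 : Int × Bool := if val = 3 ∧ t3 = false then (three + 1, true) else (three, t3)
      (p2.1, p3.1, p2.2, p3.2))
      (st.1, st.2, false, false)
    (r.1, r.2.1)) (0, 0)
  st.1 * st.2

-- ===== PORT B =====
def solve_alt (input : List String) : Int :=
  let st := input.foldl (fun (st : Int × Int) word =>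
    let counts := word.toList.foldl (fun (d : PySem.Dict Char Int) c => d.insert c (d.getD c 0 + 1)) PySem.Dict.empty
    let two := if counts.values.contains (2 : Int) then st.1 + 1 else st.1
    let three := if counts.values.contains (3 : Int) then st.2 + 1 else st.2
    (two, three)) (0, 0)
  st.1 * st.2

-- ===== PRECONDITION & SPEC =====
def Spec_solve (input : List String) (out : Int) : Prop := out = solve_alt input
instance (input : List String) (out : Int) : Decidable (Spec_solve input out) := by unfold Spec_solve; infer_instance

-- ===== CLAIM (what is proved, stated in full; the proofs are below) =====
def Claim_equal_solve : Prop := ∀ (input : List String), Dom_solve input → Spec_solve input (solve input)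

-- ===== LEMMAS AND PROOFS =====

-- A's inner loop: the flag makes each counter move at most once, exactly when some letter of the
-- suffix occurs 2 (resp. 3) times in the whole word.
theorem inner_spec (w : List Char) (l : List Char) (two three : Int) (t2 t3 : Bool) :
    l.foldl (fun (s : Int × Int × Bool × Bool) letter =>
      let two := s.1
      let three := s.2.1
      let t2 := s.2.2.1
      let t3 := s.2.2.2
      let val : Int := (w.count letter : Int)
      let p2 : Int × Bool := if val = 2 ∧ t2 = false then (two + 1, true) else (two, t2)
      let p3 : Int × Bool := if val = 3 ∧ t3 = false then (three + 1, true) else (three, t3)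
      (p2.1, p3.1, p2.2, p3.2)) (two, three, t2, t3)
    = (two + (if t2 = false ∧ ∃ c ∈ l, ((w.count c : Int)) = 2 then 1 else 0),
       three + (if t3 = false ∧ ∃ c ∈ l, ((w.count c : Int)) = 3 then 1 else 0),
       t2 || decide (∃ c ∈ l, ((w.count c : Int)) = 2),
       t3 || decide (∃ c ∈ l, ((w.count c : Int)) = 3)) := by
  induction l generalizing two three t2 t3 with
  | nil => simp
  | cons a l ih =>
    simp only [List.foldl_cons]
    by_cases h2 : ((w.count a : Int)) = 2 <;> by_cases h3 : ((w.count a : Int)) = 3 <;>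
      cases t2 <;> cases t3 <;>
      simp [ih, h2, h3, List.mem_cons]

-- B's membership test: 2 is among the counter's values iff some letter of w occurs exactly twice.
theorem values_counter_mem (w : List Char) (v : Int) :
    (PySem.Dict.counter w).values.contains v = decide (∃ c ∈ w, ((w.count c : Int)) = v) := by
  have hv : (PySem.Dict.counter w).values
      = (PySem.Set.ofList w).map (fun k => (w.count k : Int)) := by
    have := PySem.Dict.items_counter (xs := w)
    simp only [PySem.Dict.values, this, List.map_map]
    rfl
  simp only [hv, List.contains_eq_any_beq, List.any_map]
  rw [Bool.eq_iff_iff, List.any_eq_true, decide_eq_true_eq]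
  simp only [Function.comp_apply, beq_iff_eq]
  exact ⟨fun ⟨k, hk, he⟩ => ⟨k, (PySem.Set.mem_ofList _ _).1 hk, he.symm⟩,
         fun ⟨c, hc, he⟩ => ⟨c, (PySem.Set.mem_ofList _ _).2 hc, he.symm⟩⟩

theorem step_eq (st : Int × Int) (word : String) :
    (let r := word.toList.foldl (fun (s : Int × Int × Bool × Bool) letter =>
      let two := s.1
      let three := s.2.1
      let t2 := s.2.2.1
      let t3 := s.2.2.2
      let val : Int := (word.toList.count letter : Int)
      let p2 : Int × Bool := if val = 2 ∧ t2 = false then (two + 1, true) else (two, t2)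
      let p3 : Int × Bool := if val = 3 ∧ t3 = false then (three + 1, true) else (three, t3)
      (p2.1, p3.1, p2.2, p3.2))
      (st.1, st.2, false, false)
    ((r.1, r.2.1) : Int × Int))
    = (let counts := word.toList.foldl (fun (d : PySem.Dict Char Int) c => d.insert c (d.getD c 0 + 1)) PySem.Dict.empty
       let two := if counts.values.contains (2 : Int) then st.1 + 1 else st.1
       let three := if counts.values.contains (3 : Int) then st.2 + 1 else st.2
       ((two, three) : Int × Int)) := by
  simp only [inner_spec, PySem.Dict.foldl_insert_getD_add_one_eq_counter, values_counter_mem]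
  by_cases hA : ∃ c ∈ word.toList, ((word.toList.count c : Int)) = 2 <;>
    by_cases hB : ∃ c ∈ word.toList, ((word.toList.count c : Int)) = 3 <;>
      simp [hA, hB]

theorem foldl_eq (input : List String) : ∀ (st : Int × Int),
    input.foldl (fun (st : Int × Int) word =>
      let r := word.toList.foldl (fun (s : Int × Int × Bool × Bool) letter =>
        let two := s.1
        let three := s.2.1
        let t2 := s.2.2.1
        let t3 := s.2.2.2
        let val : Int := (word.toList.count letter : Int)
        let p2 : Int × Bool := if val = 2 ∧ t2 = false then (two + 1, true) else (two, t2)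
        let p3 : Int × Bool := if val = 3 ∧ t3 = false then (three + 1, true) else (three, t3)
        (p2.1, p3.1, p2.2, p3.2))
        (st.1, st.2, false, false)
      ((r.1, r.2.1) : Int × Int)) st
    = input.foldl (fun (st : Int × Int) word =>
      let counts := word.toList.foldl (fun (d : PySem.Dict Char Int) c => d.insert c (d.getD c 0 + 1)) PySem.Dict.empty
      let two := if counts.values.contains (2 : Int) then st.1 + 1 else st.1
      let three := if counts.values.contains (3 : Int) then st.2 + 1 else st.2
      ((two, three) : Int × Int)) st := by
  induction input with
  | nil => intro st; rfl
  | cons word rest ih =>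
    intro st
    simp only [List.foldl_cons]
    rw [step_eq, ih]

-- ===== VERDICT (by name: the statement is the Claim_ definition above) =====
theorem solve_spec : Claim_equal_solve := by
  intro input _
  show solve input = solve_alt input
  unfold solve solve_alt
  simp only [foldl_eq]
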